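-- pv_equiv track=rewrite | github.com/yago-mendoza/Pythology | codility.py | solution
-- ===== SOURCE A (Python) =====
-- def solution(A):
--     A.sort(reverse=True)
--     total = maxLikeTime = 0
--     for sat in A:
--         total += sat
--         if total <= 0: break
--         maxLikeTime += total
--     return maxLikeTime
-- ===== SOURCE B (Python) =====
-- def solution(A):
--     A.sort(reverse=True)
--     # Phase 1: find k = number of leading elements whose running sums all stay positive.
--     k, s = 0, 0
--     while k < len(A) and s + A[k] > 0:
--         s += A[k]
--         k += 1
--     # Phase 2: each A[i] (i < k) contributes to prefix sums P_{i+1}..P_k, i.e. (k - i) times.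
--     return sum((k - i) * x for i, x in enumerate(A[:k]))
-- ===== Notes on version B (the rewrite author's own statement) =====
-- stated objective: alternative
-- what changed: A accumulates the answer as the running sum of prefix sums in one loop with a break; B first finds only the cutoff length k (longest all-positive-prefix run) and then computes the answer as the weighted combination sum((k-i)*A[i]), a different formula with no prefix-sum accumulation in the result.
import Mathlib
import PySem

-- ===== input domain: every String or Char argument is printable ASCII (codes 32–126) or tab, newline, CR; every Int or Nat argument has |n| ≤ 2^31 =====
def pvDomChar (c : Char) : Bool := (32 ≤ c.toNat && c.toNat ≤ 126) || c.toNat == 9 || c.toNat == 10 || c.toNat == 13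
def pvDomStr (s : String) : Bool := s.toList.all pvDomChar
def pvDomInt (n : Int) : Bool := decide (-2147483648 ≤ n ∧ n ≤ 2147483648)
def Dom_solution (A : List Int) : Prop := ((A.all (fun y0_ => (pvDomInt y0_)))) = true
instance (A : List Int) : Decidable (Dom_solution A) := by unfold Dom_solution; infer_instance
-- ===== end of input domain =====

-- B replaces A's single accumulating loop by a cutoff search plus a weighted-sum formula (alternative).
-- Both Pythons sort the caller's list in place; the equivalence proved here is about the return value.

-- ===== PORT A =====
-- the for-loop: state (total, maxLikeTime); `break` modelled by returning maxLikeTime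
def solutionLoop : List Int → Int → Int → Int
  | [], _, maxLikeTime => maxLikeTime
  | sat :: rest, total, maxLikeTime =>
      let total' := total + sat
      if total' ≤ 0 then maxLikeTime
      else solutionLoop rest total' (maxLikeTime + total')

def solution (A : List Int) : Int :=
  solutionLoop (PySem.List.sorted A (fun x => x) true) 0 0

-- ===== PORT B =====
-- phase 1 (the while loop over index k with running sum s): number of leading
-- elements whose running sums all stay positive
def cutLen : List Int → Int → Nat
  | [], _ => 0
  | x :: xs, s => if 0 < s + x then 1 + cutLen xs (s + x) else 0

-- phase 2: sum((k - i) * x for i, x in enumerate(prefix)) — weights k, k-1, …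
def wsum : List Int → Int → Int
  | [], _ => 0
  | x :: xs, w => w * x + wsum xs (w - 1)

def solution_alt (A : List Int) : Int :=
  let s := PySem.List.sorted A (fun x => x) true
  let k := cutLen s 0
  wsum (s.take k) (k : Int)

-- ===== PRECONDITION & SPEC =====
def Spec_solution (A : List Int) (out : Int) : Prop := out = solution_alt A
instance (A : List Int) (out : Int) : Decidable (Spec_solution A out) := by unfold Spec_solution; infer_instance

-- ===== CLAIM (what is proved, stated in full; the proofs are below) =====
def Claim_equal_solution : Prop := ∀ (A : List Int), Dom_solution A → Spec_solution A (solution A)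

-- ===== LEMMAS AND PROOFS =====
theorem solutionLoop_eq (xs : List Int) : ∀ (t m : Int),
    solutionLoop xs t m
      = m + (cutLen xs t : Int) * t + wsum (xs.take (cutLen xs t)) (cutLen xs t : Int) := by
  induction xs with
  | nil => intro t m; simp [solutionLoop, cutLen, wsum]
  | cons x xs ih =>
    intro t m
    simp only [solutionLoop, cutLen]
    by_cases h : t + x ≤ 0
    · have hx : ¬ (0 < t + x) := by omega
      simp [h, hx, wsum]
    · have hx : 0 < t + x := by omega
      have hs : 1 + cutLen xs (t + x) = cutLen xs (t + x) + 1 := Nat.add_comm _ _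
      simp only [h, if_false, hx, if_true, ih (t + x) (m + (t + x)), hs,
        List.take_succ_cons, wsum]
      push_cast
      ring

-- ===== VERDICT (by name: the statement is the Claim_ definition above) =====
theorem solution_spec : Claim_equal_solution := by
  intro A _
  unfold Spec_solution solution solution_alt
  rw [solutionLoop_eq]
  ring
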